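-- pv_equiv track=rewrite | github.com/petpetpeter/pybullet_softbody | remove2dmesh.py | getInfoIndex
-- ===== SOURCE A (Python) =====
-- def getInfoIndex(resultList):
--     cellIndex = 0
--     meshIndex = 0
--     for i,line in enumerate(resultList):
--         if "CELLS" in line:
--             cellIndex = i
--         if "CELL_TYPES" in line:
--             meshIndex = i
--     return cellIndex,meshIndex
-- ===== SOURCE B (Python) =====
-- def getInfoIndex(resultList):
--     cellIndex = None
--     meshIndex = None
--     for i in range(len(resultList) - 1, -1, -1):
--         line = resultList[i]
--         if cellIndex is None and "CELLS" in line: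
--             cellIndex = i
--         if meshIndex is None and "CELL_TYPES" in line:
--             meshIndex = i
--         if cellIndex is not None and meshIndex is not None:
--             break
--     return (cellIndex if cellIndex is not None else 0,
--             meshIndex if meshIndex is not None else 0)
-- ===== Notes on version B (the rewrite author's own statement) =====
-- stated objective: alternative
-- what changed: Scans the list backward keeping Option accumulators and breaks as soon as both keywords have been seen, instead of a full forward pass that overwrites indices; unset results default to 0.
import Mathlib
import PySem

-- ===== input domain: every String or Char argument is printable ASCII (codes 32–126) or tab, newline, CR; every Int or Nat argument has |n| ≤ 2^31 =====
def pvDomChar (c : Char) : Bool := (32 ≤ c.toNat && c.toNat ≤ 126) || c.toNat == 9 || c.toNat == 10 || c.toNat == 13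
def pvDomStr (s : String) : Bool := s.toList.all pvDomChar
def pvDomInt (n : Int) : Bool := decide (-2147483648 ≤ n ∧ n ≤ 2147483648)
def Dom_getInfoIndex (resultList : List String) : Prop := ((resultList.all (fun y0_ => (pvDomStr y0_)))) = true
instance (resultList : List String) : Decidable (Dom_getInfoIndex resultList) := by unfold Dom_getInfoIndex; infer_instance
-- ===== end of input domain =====

-- B replaces A's full forward pass (last match wins by overwriting) with a backward scan
-- keeping Option accumulators and breaking once both keywords have been seen; same return value.

-- ===== PORT A =====
-- forward loop over enumerate(resultList), overwriting cellIndex/meshIndex on each match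
def getInfoIndex (resultList : List String) : Int × Int :=
  (PySem.List.enumerate resultList).foldl
    (fun s x =>
      let s1 := if PySem.Str.isIn "CELLS" x.2 then (x.1, s.2) else s
      if PySem.Str.isIn "CELL_TYPES" x.2 then (s1.1, x.1) else s1)
    (0, 0)

-- ===== PORT B =====
-- B's reversed-index loop with resultList[i] is the walk over the reversed enumerated pairs;
-- the two `if … is None` updates and the `break` are transcribed literally.
def getInfoIndex_go : List (Int × String) → Option Int → Option Int → Option Int × Option Int
  | [], c, m => (c, m)
  | (i, line) :: rest, c, m =>
    let c' := if c = none ∧ PySem.Str.isIn "CELLS" line then some i else c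
    let m' := if m = none ∧ PySem.Str.isIn "CELL_TYPES" line then some i else m
    if c'.isSome ∧ m'.isSome then (c', m')
    else getInfoIndex_go rest c' m'

def getInfoIndex_alt (resultList : List String) : Int × Int :=
  let r := getInfoIndex_go (PySem.List.enumerate resultList).reverse none none
  (r.1.getD 0, r.2.getD 0)

-- ===== PRECONDITION & SPEC =====
def Spec_getInfoIndex (resultList : List String) (out : Int × Int) : Prop := out = getInfoIndex_alt resultList
instance (resultList : List String) (out : Int × Int) : Decidable (Spec_getInfoIndex resultList out) := by unfold Spec_getInfoIndex; infer_instance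

-- ===== CLAIM (what is proved, stated in full; the proofs are below) =====
def Claim_equal_getInfoIndex : Prop := ∀ (resultList : List String), Dom_getInfoIndex resultList → Spec_getInfoIndex resultList (getInfoIndex resultList)

-- ===== LEMMAS AND PROOFS =====

-- first index (from the front of xs) whose line contains key
def pvFirst (key : String) (xs : List (Int × String)) : Option Int :=
  (xs.find? (fun x => PySem.Str.isIn key x.2)).map (·.1)

theorem pvFirst_nil (key : String) : pvFirst key [] = none := rfl

theorem pvFirst_cons (key : String) (i : Int) (line : String) (rest : List (Int × String)) :
    pvFirst key ((i, line) :: rest) =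
      if PySem.Str.isIn key line then some i else pvFirst key rest := by
  unfold pvFirst
  simp only [PySem.Str.isIn_eq]
  cases h : PySem.Chars.isIn key.toList line.toList with
  | true => rw [List.find?_cons_of_pos (by simpa using h)]; simp
  | false => rw [List.find?_cons_of_neg (by simp [h])]; simp

theorem pvFirst_append (key : String) (xs ys : List (Int × String)) :
    pvFirst key (xs ++ ys) = (pvFirst key xs).orElse (fun _ => pvFirst key ys) := by
  simp only [pvFirst, List.find?_append]
  cases List.find? (fun x => PySem.Str.isIn key x.2) xs <;> simp

theorem go_eq (xs : List (Int × String)) : ∀ c m : Option Int,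
    getInfoIndex_go xs c m =
      (c.orElse (fun _ => pvFirst "CELLS" xs), m.orElse (fun _ => pvFirst "CELL_TYPES" xs)) := by
  induction xs with
  | nil => intro c m; cases c <;> cases m <;> simp [getInfoIndex_go, pvFirst_nil]
  | cons x rest ih =>
    intro c m
    obtain ⟨i, line⟩ := x
    have key1 : ∀ (c : Option Int) (key : String),
        (if c = none ∧ PySem.Str.isIn key line then some i else c).orElse
            (fun _ => pvFirst key rest) =
          c.orElse (fun _ => pvFirst key ((i, line) :: rest)) := by
      intro c key
      rw [pvFirst_cons]
      cases c with
      | some a => simp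
      | none => cases h : PySem.Str.isIn key line <;> simp
    rw [getInfoIndex_go]
    by_cases hb :
        ((if c = none ∧ PySem.Str.isIn "CELLS" line then some i else c).isSome ∧
         (if m = none ∧ PySem.Str.isIn "CELL_TYPES" line then some i else m).isSome)
    · rw [if_pos hb]
      obtain ⟨h1, h2⟩ := hb
      rw [← key1 c "CELLS", ← key1 m "CELL_TYPES"]
      rw [Option.isSome_iff_exists] at h1 h2
      obtain ⟨a, ha⟩ := h1; obtain ⟨b, hb'⟩ := h2
      rw [ha, hb']; simp
    · rw [if_neg hb, ih, key1, key1]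

theorem foldl_eq (xs : List (Int × String)) : ∀ a b : Int,
    xs.foldl
      (fun s x =>
        let s1 := if PySem.Str.isIn "CELLS" x.2 then (x.1, s.2) else s
        if PySem.Str.isIn "CELL_TYPES" x.2 then (s1.1, x.1) else s1)
      (a, b) =
    ((pvFirst "CELLS" xs.reverse).getD a, (pvFirst "CELL_TYPES" xs.reverse).getD b) := by
  induction xs with
  | nil => intro a b; simp [pvFirst_nil]
  | cons x rest ih =>
    intro a b
    obtain ⟨i, line⟩ := x
    have step : ∀ (key : String) (v : Int),
        (pvFirst key (rest.reverse ++ [(i, line)])).getD v =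
          (pvFirst key rest.reverse).getD
            (if PySem.Str.isIn key line then i else v) := by
      intro key v
      rw [pvFirst_append]
      cases h : pvFirst key rest.reverse with
      | some a => rfl
      | none =>
        rw [pvFirst_cons]
        cases hk : PySem.Str.isIn key line <;> simp [pvFirst_nil]
    simp only [List.foldl_cons, List.reverse_cons]
    rw [ih, step, step]
    split_ifs <;> rfl

-- ===== VERDICT (by name: the statement is the Claim_ definition above) =====
theorem getInfoIndex_spec : Claim_equal_getInfoIndex := by
  intro resultList _
  unfold Spec_getInfoIndex getInfoIndex getInfoIndex_alt
  rw [foldl_eq, go_eq]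
  simp [Option.getD]
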